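-- pv_equiv track=rewrite | github.com/dmmiller/adventofcode | 2024/day22/solution.py | findMaxBananas
-- ===== SOURCE A (Python) =====
-- from collections import deque
--
-- def generateSecretNumber(seed: int) -> int:
--   def mix(a: int, b: int) -> int:
--     return a ^ b
--
--   def prune(a: int) -> int:
--     return a % 16777216
--
--   def step1(a: int) -> int:
--     return prune(mix(a * 64, a))
--
--   def step2(a: int) -> int:
--     return prune(mix(a // 32, a))
--
--   def step3(a: int) -> int:
--     return prune(mix(a * 2048, a))
--
--   return step3(step2(step1(seed)))
--
-- def getPriceChainMap(seed: int, count: int) -> dict[tuple[int, int, int, int], int]: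
--   result = {}
--   chain = deque()
--   previous = seed % 10
--   for _ in range(count):
--     seed = generateSecretNumber(seed)
--     diff = (seed % 10) - previous
--     chain.append(diff)
--     previous = seed % 10
--     if len(chain) > 4:
--       chain.popleft()
--     if len(chain) == 4:
--       possible = (chain[0], chain[1], chain[2], chain[3])
--       if possible not in result:
--         result[possible] = seed % 10
--
--   return result
--
-- def findMaxBananas(buyers: list[int]) -> int:
--   chainMaps = [getPriceChainMap(buyer, 2000) for buyer in buyers]
--   best = 0
--   for a in range(-9, 10):
--     for b in range(-9, 10):
--       for c in range(-9, 10):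
--         for d in range(-9, 10):
--           instruction = (a, b, c, d)
--           value = sum(chainMap[instruction] if instruction in chainMap else 0 for chainMap in chainMaps)
--           if value > best:
--             best = value
--   return best
-- ===== SOURCE B (Python) =====
-- def findMaxBananas(buyers: list[int]) -> int:
--   # Staged passes per buyer: build the price list, then the diff list, then scan
--   # 4-diff windows recording first-occurrence prices; per-sequence totals are
--   # accumulated in one dict over actually occurring keys while a running max of
--   # the written totals is kept (valid: a key's total only ever grows).
--   M = 16777216
--   totals = {}
--   best = 0
--   for seed in buyers:
--     prices = []
--     s = seed
--     for _ in range(2000):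
--       s = (s * 64 ^ s) % M
--       s = (s // 32 ^ s) % M
--       s = (s * 2048 ^ s) % M
--       prices.append(s % 10)
--     diffs = [b - a for a, b in zip([seed % 10] + prices, prices)]
--     first = {}
--     for i in range(len(diffs) - 3):
--       key = (diffs[i], diffs[i + 1], diffs[i + 2], diffs[i + 3])
--       if key not in first:
--         first[key] = prices[i + 3]
--     for key, price in first.items():
--       total = totals.get(key, 0) + price
--       totals[key] = total
--       if total > best:
--         best = total
--   return best
-- ===== Notes on version B (the rewrite author's own statement) =====
-- stated objective: faster
-- what changed: Instead of A's streaming deque over secret numbers plus a scan of all 19^4 candidate difference sequences, B builds per buyer the explicit price list, the diff list via zip, scans indexed 4-diff windows for first-occurrence prices, and accumulates per-sequence totals in one dict over actually occurring keys while keeping a running max of the written totals.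
import Mathlib
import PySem

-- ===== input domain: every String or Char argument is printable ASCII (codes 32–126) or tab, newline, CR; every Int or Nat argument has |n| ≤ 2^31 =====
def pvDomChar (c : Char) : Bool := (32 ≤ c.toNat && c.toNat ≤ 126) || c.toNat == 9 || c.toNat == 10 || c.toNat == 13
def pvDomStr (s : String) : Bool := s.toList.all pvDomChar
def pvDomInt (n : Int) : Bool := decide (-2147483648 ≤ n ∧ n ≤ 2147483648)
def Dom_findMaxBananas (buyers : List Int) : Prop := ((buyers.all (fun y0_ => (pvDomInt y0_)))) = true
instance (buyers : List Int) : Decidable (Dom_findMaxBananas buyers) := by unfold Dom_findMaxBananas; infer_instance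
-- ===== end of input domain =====

-- B replaces A's streaming-deque chain maps and 19^4 grid scan by staged per-buyer passes
-- (price list, diff list, indexed window scan) merged into one totals dict over occurring
-- keys with a running max of the written totals (objective: faster, constant-factor).


-- ===== PORT A =====
def pvMix (a b : Int) : Int := PySem.Int.bxor a b
def pvPrune (a : Int) : Int := PySem.Int.mod a 16777216
def pvStep1 (a : Int) : Int := pvPrune (pvMix (a * 64) a)
def pvStep2 (a : Int) : Int := pvPrune (pvMix (PySem.Int.floordiv a 32) a)
def pvStep3 (a : Int) : Int := pvPrune (pvMix (a * 2048) a)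

def generateSecretNumber (seed : Int) : Int := pvStep3 (pvStep2 (pvStep1 seed))

-- A's chain map is only membership-tested and indexed (never iterated), so Std.HashMap
-- models the Python dict exactly here; one iteration of getPriceChainMap's loop,
-- state = (result, chain, previous, seed)
def pvGPCMStepA (st : Std.HashMap (Int × Int × Int × Int) Int × List Int × Int × Int) :
    Std.HashMap (Int × Int × Int × Int) Int × List Int × Int × Int :=
  let result := st.1
  let seed := generateSecretNumber st.2.2.2
  let diff := PySem.Int.mod seed 10 - st.2.2.1
  let chain := st.2.1 ++ [diff]                -- chain.append(diff)
  let previous := PySem.Int.mod seed 10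
  let chain := if chain.length > 4 then chain.drop 1 else chain   -- chain.popleft()
  if chain.length = 4 then
    -- indices 0..3 are in range (length = 4), so the defaults of pyGetD are unreachable
    let possible := (PySem.List.pyGetD chain 0 0, PySem.List.pyGetD chain 1 0,
                     PySem.List.pyGetD chain 2 0, PySem.List.pyGetD chain 3 0)
    if result.contains possible then (result, chain, previous, seed)
    else (result.insert possible (PySem.Int.mod seed 10), chain, previous, seed)
  else (result, chain, previous, seed)

def getPriceChainMap (seed : Int) (count : Int) : Std.HashMap (Int × Int × Int × Int) Int :=
  ((PySem.List.pyRange 0 count 1).foldl (fun st _ => pvGPCMStepA st)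
    (Std.HashMap.emptyWithCapacity, ([] : List Int), PySem.Int.mod seed 10, seed)).1

def findMaxBananas (buyers : List Int) : Int :=
  let chainMaps := buyers.map (fun buyer => getPriceChainMap buyer 2000)
  (PySem.List.pyRange (-9) 10 1).foldl (fun best a =>
    (PySem.List.pyRange (-9) 10 1).foldl (fun best b =>
      (PySem.List.pyRange (-9) 10 1).foldl (fun best c =>
        (PySem.List.pyRange (-9) 10 1).foldl (fun best d =>
          let instruction := (a, b, c, d)
          let value := (chainMaps.map (fun cm =>
            if cm.contains instruction then cm.getD instruction 0 else 0)).sum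
          if value > best then value else best) best) best) best) 0

-- ===== PORT B =====
-- the three chained secret-update lines of Source B's inner loop
def pvNextB (s : Int) : Int :=
  let s1 := PySem.Int.mod (PySem.Int.bxor (s * 64) s) 16777216
  let s2 := PySem.Int.mod (PySem.Int.bxor (PySem.Int.floordiv s1 32) s1) 16777216
  PySem.Int.mod (PySem.Int.bxor (s2 * 2048) s2) 16777216

-- per-buyer first-occurrence dict: price list, then diff list, then indexed window scan
def pvBuyerFirst (seed : Int) : PySem.Dict (Int × Int × Int × Int) Int :=
  let pr := (PySem.List.pyRange 0 2000 1).foldl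
      (fun st _ => let s := pvNextB st.1; (s, st.2 ++ [PySem.Int.mod s 10]))
      (seed, ([] : List Int))
  let prices := pr.2
  let diffs := ((PySem.Int.mod seed 10 :: prices).zip prices).map (fun p => p.2 - p.1)
  (PySem.List.pyRange 0 ((diffs.length : Int) - 3) 1).foldl (fun first i =>
    let key := (PySem.List.pyGetD diffs i 0, PySem.List.pyGetD diffs (i + 1) 0,
                PySem.List.pyGetD diffs (i + 2) 0, PySem.List.pyGetD diffs (i + 3) 0)
    if first.contains key then first
    else first.insert key (PySem.List.pyGetD prices (i + 3) 0)) PySem.Dict.empty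

-- totals is only ever looked up and written (never iterated), so Std.HashMap models the
-- Python dict exactly here; best is the running max threaded through the merge loop
-- body of Source B's merge loop: write the new total, update the running max
def pvMergeStep (acc : Std.HashMap (Int × Int × Int × Int) Int × Int)
    (p : (Int × Int × Int × Int) × Int) : Std.HashMap (Int × Int × Int × Int) Int × Int :=
  let total := acc.1.getD p.1 0 + p.2
  (acc.1.insert p.1 total, if total > acc.2 then total else acc.2)

def findMaxBananas_alt (buyers : List Int) : Int :=
  (buyers.foldl (fun acc seed => (pvBuyerFirst seed).items.foldl pvMergeStep acc)
    (Std.HashMap.emptyWithCapacity, 0)).2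

-- ===== PRECONDITION & SPEC =====
def Spec_findMaxBananas (buyers : List Int) (out : Int) : Prop := out = findMaxBananas_alt buyers
instance (buyers : List Int) (out : Int) : Decidable (Spec_findMaxBananas buyers out) := by unfold Spec_findMaxBananas; infer_instance

-- ===== CLAIM (what is proved, stated in full; the proofs are below) =====
def Claim_equal_findMaxBananas : Prop := ∀ (buyers : List Int), Dom_findMaxBananas buyers → Spec_findMaxBananas buyers (findMaxBananas buyers)

-- ===== LEMMAS AND PROOFS =====

-- Dict model of A's loop body (proof-side; the port itself uses Std.HashMap)
def pvGPCMStep (st : PySem.Dict (Int × Int × Int × Int) Int × List Int × Int × Int) :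
    PySem.Dict (Int × Int × Int × Int) Int × List Int × Int × Int :=
  let result := st.1
  let seed := generateSecretNumber st.2.2.2
  let diff := PySem.Int.mod seed 10 - st.2.2.1
  let chain := st.2.1 ++ [diff]
  let previous := PySem.Int.mod seed 10
  let chain := if chain.length > 4 then chain.drop 1 else chain
  if chain.length = 4 then
    let possible := (PySem.List.pyGetD chain 0 0, PySem.List.pyGetD chain 1 0,
                     PySem.List.pyGetD chain 2 0, PySem.List.pyGetD chain 3 0)
    if result.contains possible then (result, chain, previous, seed)
    else (result.insert possible (PySem.Int.mod seed 10), chain, previous, seed)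
  else (result, chain, previous, seed)

def pvGPCMD (seed : Int) (count : Int) : PySem.Dict (Int × Int × Int × Int) Int :=
  ((PySem.List.pyRange 0 count 1).foldl (fun st _ => pvGPCMStep st)
    (PySem.Dict.empty, ([] : List Int), PySem.Int.mod seed 10, seed)).1

-- A's HashMap chain map and the Dict model agree on every query
def pvRel (hm : Std.HashMap (Int × Int × Int × Int) Int)
    (d : PySem.Dict (Int × Int × Int × Int) Int) : Prop :=
  ∀ t, hm.contains t = d.contains t ∧ hm.getD t 0 = d.getD t 0

lemma pvStep_rel (st1 : Std.HashMap (Int × Int × Int × Int) Int × List Int × Int × Int)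
    (st2 : PySem.Dict (Int × Int × Int × Int) Int × List Int × Int × Int)
    (h2 : st1.2 = st2.2) (h1 : pvRel st1.1 st2.1) :
    (pvGPCMStepA st1).2 = (pvGPCMStep st2).2 ∧
      pvRel (pvGPCMStepA st1).1 (pvGPCMStep st2).1 := by
  obtain ⟨hm, rest⟩ := st1
  obtain ⟨d, rest2⟩ := st2
  dsimp only at h2 h1
  subst h2
  obtain ⟨c, p, sd⟩ := rest
  unfold pvGPCMStepA pvGPCMStep
  dsimp only
  set chain2 := if (c ++ [PySem.Int.mod (generateSecretNumber sd) 10 - p]).length > 4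
    then (c ++ [PySem.Int.mod (generateSecretNumber sd) 10 - p]).drop 1
    else c ++ [PySem.Int.mod (generateSecretNumber sd) 10 - p] with hchain2
  by_cases hlen : chain2.length = 4
  · rw [if_pos hlen, if_pos hlen]
    set possible := (PySem.List.pyGetD chain2 0 0, PySem.List.pyGetD chain2 1 0,
      PySem.List.pyGetD chain2 2 0, PySem.List.pyGetD chain2 3 0)
    rw [(h1 possible).1]
    by_cases hc : d.contains possible
    · rw [if_pos hc, if_pos hc]
      exact ⟨rfl, h1⟩
    · rw [if_neg hc, if_neg hc]
      refine ⟨rfl, fun t => ⟨?_, ?_⟩⟩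
      · rw [Std.HashMap.contains_insert, PySem.Dict.contains_insert, (h1 t).1, Bool.beq_comm]
      · rw [Std.HashMap.getD_insert, PySem.Dict.getD_insert, (h1 t).2]
        by_cases ht : t = possible
        · rw [if_pos (by simp [ht]), if_pos ht]
        · rw [if_neg (by simp [Ne.symm ht]), if_neg ht]
  · rw [if_neg hlen, if_neg hlen]
    exact ⟨rfl, h1⟩

lemma pvFold_rel (l : List Int)
    (st1 : Std.HashMap (Int × Int × Int × Int) Int × List Int × Int × Int)
    (st2 : PySem.Dict (Int × Int × Int × Int) Int × List Int × Int × Int)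
    (h2 : st1.2 = st2.2) (h1 : pvRel st1.1 st2.1) :
    (l.foldl (fun st _ => pvGPCMStepA st) st1).2
        = (l.foldl (fun st _ => pvGPCMStep st) st2).2 ∧
      pvRel (l.foldl (fun st _ => pvGPCMStepA st) st1).1
        (l.foldl (fun st _ => pvGPCMStep st) st2).1 := by
  induction l generalizing st1 st2 with
  | nil => exact ⟨h2, h1⟩
  | cons x l ih =>
    rw [List.foldl_cons, List.foldl_cons]
    have hs := pvStep_rel st1 st2 h2 h1
    exact ih _ _ hs.1 hs.2

lemma pvGPCM_rel (s cnt : Int) : pvRel (getPriceChainMap s cnt) (pvGPCMD s cnt) := by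
  unfold getPriceChainMap pvGPCMD
  refine (pvFold_rel (PySem.List.pyRange 0 cnt 1) _ _ rfl (fun t => ⟨?_, ?_⟩)).2
  · rw [Std.HashMap.contains_emptyWithCapacity]
    rfl
  · rw [Std.HashMap.getD_emptyWithCapacity]
    rfl

-- the secret-number sequence, prices, diffs and window keys of one buyer
def pvSeq (s : Int) : Nat → Int
  | 0 => s
  | k + 1 => generateSecretNumber (pvSeq s k)

def pvPrice (s : Int) (k : Nat) : Int := PySem.Int.mod (pvSeq s k) 10
def pvDiff (s : Int) (k : Nat) : Int := pvPrice s (k + 1) - pvPrice s k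
def pvKey (s : Int) (i : Nat) : Int × Int × Int × Int :=
  (pvDiff s i, pvDiff s (i + 1), pvDiff s (i + 2), pvDiff s (i + 3))

-- canonical first-occurrence window scan over the first n diffs
def pvScanStep (s : Int) (d : PySem.Dict (Int × Int × Int × Int) Int) (i : Nat) :
    PySem.Dict (Int × Int × Int × Int) Int :=
  if d.contains (pvKey s i) then d else d.insert (pvKey s i) (pvPrice s (i + 4))

def pvScan (s : Int) (n : Nat) : PySem.Dict (Int × Int × Int × Int) Int :=
  (List.range (n - 3)).foldl (pvScanStep s) PySem.Dict.empty

def pvChain (s : Int) (n : Nat) : List Int := ((List.range n).drop (n - 4)).map (pvDiff s)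

def pvCM (b : Int) : PySem.Dict (Int × Int × Int × Int) Int := pvScan b 2000

lemma pvNextB_eq (s : Int) : pvNextB s = generateSecretNumber s := rfl

lemma pvChain_succ (s : Int) (n : Nat) :
    (if (pvChain s n ++ [pvDiff s n]).length > 4
      then (pvChain s n ++ [pvDiff s n]).drop 1 else pvChain s n ++ [pvDiff s n])
      = pvChain s (n + 1) := by
  have hlen : (pvChain s n).length = n - (n - 4) := by
    simp [pvChain]
  have htgt : pvChain s (n + 1)
      = ((List.range n).drop (n - 3)).map (pvDiff s) ++ [pvDiff s n] := by
    unfold pvChain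
    rw [List.range_succ, show n + 1 - 4 = n - 3 by omega,
      List.drop_append_of_le_length (by simp only [List.length_range]; omega), List.map_append]
    rfl
  by_cases h4 : 4 ≤ n
  · rw [if_pos (by simp only [List.length_append, List.length_cons, List.length_nil, hlen]; omega),
      htgt, List.drop_append_of_le_length (by rw [hlen]; omega)]
    congr 1
    unfold pvChain
    rw [← List.map_drop, List.drop_drop]
    congr 2
    omega
  · rw [if_neg (by simp only [List.length_append, List.length_cons, List.length_nil, hlen]; omega),
      htgt]
    congr 2
    unfold pvChain
    congr 2
    omega

lemma pvChain_four (s : Int) (n : Nat) (h : 3 ≤ n) :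
    pvChain s (n + 1) = [pvDiff s (n - 3), pvDiff s (n - 2), pvDiff s (n - 1), pvDiff s n] := by
  unfold pvChain
  rw [show n + 1 = (n - 3) + 4 by omega, List.range_add,
    show (n - 3) + 4 - 4 = n - 3 by omega,
    List.drop_append_of_le_length (by simp), List.drop_of_length_le (by simp)]
  simp only [List.nil_append, List.map_map]
  show _ = [pvDiff s (n - 3), pvDiff s (n - 2), pvDiff s (n - 1), pvDiff s n]
  simp [List.range_succ]
  refine ⟨by congr 1; omega, by congr 1; omega, by congr 1; omega⟩

lemma pvChain_len (s : Int) (n : Nat) : (pvChain s n).length = n - (n - 4) := by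
  simp [pvChain]

-- characterization of A's deque loop after n iterations
lemma pvAFold (s : Int) (n : Nat) :
    (PySem.List.pyRange 0 (n : Int) 1).foldl (fun st _ => pvGPCMStep st)
      (PySem.Dict.empty, ([] : List Int), PySem.Int.mod s 10, s)
      = (pvScan s n, pvChain s n, pvPrice s n, pvSeq s n) := by
  induction n with
  | zero =>
    rw [Nat.cast_zero, PySem.List.pyRange_one_eq_nil le_rfl]
    simp [pvScan, pvChain, pvPrice, pvSeq]
  | succ n ih =>
    rw [Nat.cast_succ, PySem.List.pyRange_one_succ_right (by positivity),
      List.foldl_append, ih]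
    show pvGPCMStep (pvScan s n, pvChain s n, pvPrice s n, pvSeq s n) = _
    unfold pvGPCMStep
    simp only
    have hseed : generateSecretNumber (pvSeq s n) = pvSeq s (n + 1) := rfl
    have hdiff : PySem.Int.mod (generateSecretNumber (pvSeq s n)) 10 - pvPrice s n
        = pvDiff s n := rfl
    rw [hdiff, pvChain_succ, hseed]
    by_cases h3 : 3 ≤ n
    · have h4 : (pvChain s (n + 1)).length = 4 := by rw [pvChain_len]; omega
      rw [if_pos h4]
      have hidx : n - 3 + 4 = n + 1 := by omega
      have hch := pvChain_four s n h3
      have hkey : (PySem.List.pyGetD (pvChain s (n + 1)) 0 0,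
          PySem.List.pyGetD (pvChain s (n + 1)) 1 0,
          PySem.List.pyGetD (pvChain s (n + 1)) 2 0,
          PySem.List.pyGetD (pvChain s (n + 1)) 3 0) = pvKey s (n - 3) := by
        rw [hch]
        unfold pvKey
        refine Prod.ext ?_ (Prod.ext ?_ (Prod.ext ?_ ?_)) <;>
          simp [PySem.List.pyGetD] <;> congr 1 <;> omega
      have hscan : pvScan s (n + 1) = pvScanStep s (pvScan s n) (n - 3) := by
        unfold pvScan
        rw [show n + 1 - 3 = (n - 3) + 1 by omega, List.range_succ, List.foldl_append]
        rfl
      rw [hkey, hscan]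
      unfold pvScanStep
      rw [hidx]
      by_cases hc : (pvScan s n).contains (pvKey s (n - 3))
      · rw [if_pos hc, if_pos hc]
        rfl
      · rw [if_neg hc, if_neg hc]
        rfl
    · have h4 : ¬ (pvChain s (n + 1)).length = 4 := by rw [pvChain_len]; omega
      rw [if_neg h4]
      have hscan : pvScan s (n + 1) = pvScan s n := by
        unfold pvScan
        rw [show n + 1 - 3 = n - 3 by omega]
      rw [hscan]
      rfl

lemma pvAFoldGen (s : Int) (c : Int) (n : Nat) (h : c = (n : Int)) :
    (PySem.List.pyRange 0 c 1).foldl (fun st _ => pvGPCMStep st)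
      (PySem.Dict.empty, ([] : List Int), PySem.Int.mod s 10, s)
      = (pvScan s n, pvChain s n, pvPrice s n, pvSeq s n) := by
  subst h; exact pvAFold s n

lemma pvGPCMD_eq (s : Int) : pvGPCMD s 2000 = pvCM s := by
  rw [pvGPCMD, pvAFoldGen s 2000 2000 (by norm_num)]
  simp only [pvCM]

-- characterization of B's price-building loop
lemma pvBFold (s : Int) (n : Nat) :
    (PySem.List.pyRange 0 (n : Int) 1).foldl
      (fun (st : Int × List Int) _ => let t := pvNextB st.1; (t, st.2 ++ [PySem.Int.mod t 10]))
      (s, ([] : List Int))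
      = (pvSeq s n, (List.range n).map (fun j => pvPrice s (j + 1))) := by
  induction n with
  | zero =>
    rw [Nat.cast_zero, PySem.List.pyRange_one_eq_nil le_rfl]
    simp [pvSeq]
  | succ n ih =>
    rw [Nat.cast_succ, PySem.List.pyRange_one_succ_right (by positivity),
      List.foldl_append, ih]
    show (pvNextB (pvSeq s n), _) = _
    rw [pvNextB_eq]
    have h : generateSecretNumber (pvSeq s n) = pvSeq s (n + 1) := rfl
    rw [h, List.range_succ, List.map_append]
    rfl

-- the zip comprehension computes exactly the diff sequence
lemma pvDiffs_eq (s : Int) (n : Nat) :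
    (((PySem.Int.mod s 10 :: (List.range n).map (fun j => pvPrice s (j + 1))).zip
        ((List.range n).map (fun j => pvPrice s (j + 1)))).map (fun p => p.2 - p.1))
      = (List.range n).map (pvDiff s) := by
  apply List.ext_getElem
  · simp
  · intro i h1 h2
    simp only [List.length_map, List.length_zip, List.length_cons, List.length_range,
      Nat.min_def] at h1 h2
    simp only [List.getElem_map, List.getElem_zip, List.getElem_range]
    rcases i with _ | j
    · simp only [List.getElem_cons_zero]
      show pvPrice s 1 - PySem.Int.mod s 10 = pvDiff s 0
      rfl
    · rw [List.getElem_cons_succ]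
      simp only [List.getElem_map, List.getElem_range]
      rfl

lemma pvBuyerFirst_eq (s : Int) : pvBuyerFirst s = pvCM s := by
  have h1 : ((PySem.List.pyRange 0 2000 1).foldl
      (fun (st : Int × List Int) _ => let t := pvNextB st.1; (t, st.2 ++ [PySem.Int.mod t 10]))
      (s, ([] : List Int)))
      = (pvSeq s 2000, (List.range 2000).map (fun j => pvPrice s (j + 1))) := by
    rw [show (2000 : Int) = ((2000 : Nat) : Int) by norm_num, pvBFold]
  simp only [pvBuyerFirst, h1, pvDiffs_eq, List.length_map, List.length_range]
  rw [show ((2000 : Nat) : Int) - 3 = ((1997 : Nat) : Int) by norm_num,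
    PySem.List.pyRange_zero_natCast, List.foldl_map,
    show pvCM s = (List.range 1997).foldl (pvScanStep s) PySem.Dict.empty by
      unfold pvCM pvScan; norm_num]
  apply PySem.List.foldl_congr_mem
  intro d j hj
  rw [List.mem_range] at hj
  have hD : ∀ k : Nat, k < 2000 →
      PySem.List.pyGetD ((List.range 2000).map (pvDiff s)) ((k : Int)) 0 = pvDiff s k := by
    intro k hk
    rw [PySem.List.pyGetD_natCast, List.getD_eq_getElem _ _ (by simpa using hk)]
    simp
  have hP : PySem.List.pyGetD ((List.range 2000).map (fun j => pvPrice s (j + 1)))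
      (((j + 3 : Nat)) : Int) 0 = pvPrice s (j + 4) := by
    rw [PySem.List.pyGetD_natCast, List.getD_eq_getElem _ _ (by simp; omega)]
    simp only [List.getElem_map, List.getElem_range]
  rw [show ((j : Int) + 1) = (((j + 1 : Nat)) : Int) by push_cast; ring,
    show ((j : Int) + 2) = (((j + 2 : Nat)) : Int) by push_cast; ring,
    show ((j : Int) + 3) = (((j + 3 : Nat)) : Int) by push_cast; ring]
  rw [hD j (by omega), hD (j + 1) (by omega), hD (j + 2) (by omega), hD (j + 3) (by omega), hP]
  rfl

-- bounds on prices and diffs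
lemma pvPrice_nonneg (s : Int) (k : Nat) : 0 ≤ pvPrice s k :=
  PySem.Int.mod_nonneg _ (by norm_num)

lemma pvPrice_lt (s : Int) (k : Nat) : pvPrice s k < 10 :=
  PySem.Int.mod_lt _ (by norm_num)

def pvGood (t : Int × Int × Int × Int) : Prop :=
  (-9 ≤ t.1 ∧ t.1 ≤ 9) ∧ (-9 ≤ t.2.1 ∧ t.2.1 ≤ 9) ∧ (-9 ≤ t.2.2.1 ∧ t.2.2.1 ≤ 9) ∧
    (-9 ≤ t.2.2.2 ∧ t.2.2.2 ≤ 9)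

lemma pvGood_key (s : Int) (i : Nat) : pvGood (pvKey s i) := by
  have hd : ∀ k : Nat, -9 ≤ pvDiff s k ∧ pvDiff s k ≤ 9 := by
    intro k
    have h1 := pvPrice_nonneg s k
    have h2 := pvPrice_lt s k
    have h3 := pvPrice_nonneg s (k + 1)
    have h4 := pvPrice_lt s (k + 1)
    unfold pvDiff
    omega
  exact ⟨hd i, hd (i + 1), hd (i + 2), hd (i + 3)⟩

-- invariant of the window scan: keys good and unique, values nonnegative
lemma pvScan_fold_inv (s : Int) (l : List Nat) (d : PySem.Dict (Int × Int × Int × Int) Int)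
    (h : d.keys.Nodup ∧ (∀ k ∈ d.keys, pvGood k) ∧ (∀ v ∈ d.values, 0 ≤ v)) :
    (l.foldl (pvScanStep s) d).keys.Nodup ∧
      (∀ k ∈ (l.foldl (pvScanStep s) d).keys, pvGood k) ∧
      (∀ v ∈ (l.foldl (pvScanStep s) d).values, 0 ≤ v) := by
  induction l generalizing d with
  | nil => exact h
  | cons i l ih =>
    rw [List.foldl_cons]
    apply ih
    unfold pvScanStep
    by_cases hc : d.contains (pvKey s i)
    · rw [if_pos hc]; exact h
    · rw [if_neg hc]
      refine ⟨PySem.Dict.nodup_keys_insert _ _ _ h.1, ?_, ?_⟩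
      · intro k hk
        rcases (PySem.Dict.mem_keys_insert _ _ _ _).mp hk with rfl | hk'
        · exact pvGood_key s i
        · exact h.2.1 k hk'
      · intro v hv
        rcases PySem.Dict.mem_values_insert _ _ _ _ hv with rfl | hv'
        · exact pvPrice_nonneg s (i + 4)
        · exact h.2.2 v hv'

lemma pvCM_inv (b : Int) :
    (pvCM b).keys.Nodup ∧ (∀ k ∈ (pvCM b).keys, pvGood k) ∧ (∀ v ∈ (pvCM b).values, 0 ≤ v) := by
  unfold pvCM pvScan
  exact pvScan_fold_inv b _ PySem.Dict.empty
    ⟨by simp [PySem.Dict.keys_empty], by simp [PySem.Dict.keys_empty],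
     by intro v hv; simp [PySem.Dict.values, PySem.Dict.empty] at hv⟩

lemma pvCM_getD_nonneg (b : Int) (t : Int × Int × Int × Int) : 0 ≤ (pvCM b).getD t 0 := by
  cases hg : (pvCM b).get? t with
  | none => rw [PySem.Dict.getD_of_get?_eq_none _ 0 hg]
  | some v =>
    rw [PySem.Dict.getD_of_get?_eq_some _ 0 hg]
    exact (pvCM_inv b).2.2 v (List.mem_map.mpr ⟨(t, v), PySem.Dict.mem_items_of_get?_eq_some _ hg, rfl⟩)

-- total bananas a sequence t earns across the chain maps cms
def pvS (cms : List (PySem.Dict (Int × Int × Int × Int) Int)) (t : Int × Int × Int × Int) : Int :=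
  (cms.map (fun cm => cm.getD t 0)).sum

def pvGrid : List (Int × Int × Int × Int) :=
  (PySem.List.pyRange (-9) 10 1).flatMap (fun a =>
    (PySem.List.pyRange (-9) 10 1).flatMap (fun b =>
      (PySem.List.pyRange (-9) 10 1).flatMap (fun c =>
        (PySem.List.pyRange (-9) 10 1).map (fun d => (a, b, c, d)))))

lemma pvGood_mem_grid {t : Int × Int × Int × Int} (h : pvGood t) : t ∈ pvGrid := by
  obtain ⟨a, b, c, d⟩ := t
  obtain ⟨h1, h2, h3, h4⟩ := h
  dsimp only at h1 h2 h3 h4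
  simp only [pvGrid, List.mem_flatMap, List.mem_map, PySem.List.mem_pyRange_one]
  exact ⟨a, by omega, b, by omega, c, by omega, d, by omega, rfl⟩

lemma pvIf_eq (cm : PySem.Dict (Int × Int × Int × Int) Int) (t : Int × Int × Int × Int) :
    (if cm.contains t then cm.getD t 0 else 0) = cm.getD t 0 := by
  by_cases hc : cm.contains t
  · simp [hc]
  · simp [hc, PySem.Dict.getD_of_not_contains cm 0 (by simpa using hc)]

lemma pvIfA_eq (buyer : Int) (t : Int × Int × Int × Int) :
    (if (getPriceChainMap buyer 2000).contains t
      then (getPriceChainMap buyer 2000).getD t 0 else 0)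
      = (pvCM buyer).getD t 0 := by
  have hr := pvGPCM_rel buyer 2000
  rw [(hr t).1, (hr t).2, pvGPCMD_eq]
  exact pvIf_eq _ t

lemma pvA_eq_grid (buyers : List Int) :
    findMaxBananas buyers
      = pvGrid.foldl (fun best t => max best (pvS (buyers.map pvCM) t)) 0 := by
  have hmax : ∀ (b v : Int), (if v > b then v else b) = max b v := by intros; omega
  unfold findMaxBananas pvGrid
  simp only [List.map_map, Function.comp_def, pvIfA_eq, hmax, pvS, List.foldl_flatMap,
    List.foldl_map]

-- the merge loop over an item list: totals gains, per key t, the sum of matching values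
lemma pvAccH_getD (L : List ((Int × Int × Int × Int) × Int))
    (T : Std.HashMap (Int × Int × Int × Int) Int) (t : Int × Int × Int × Int) :
    (L.foldl (fun T p => T.insert p.1 (T.getD p.1 0 + p.2)) T).getD t 0
      = T.getD t 0 + ((L.filter (fun p => p.1 == t)).map (·.2)).sum := by
  induction L generalizing T with
  | nil => simp
  | cons p L ih =>
    simp only [List.foldl_cons, ih, List.filter_cons]
    by_cases hp : p.1 = t
    · simp only [hp, beq_self_eq_true, if_true, List.map_cons, List.sum_cons,
        Std.HashMap.getD_insert]
      ring
    · have hgd : ((T.insert p.1 (T.getD p.1 0 + p.2)).getD t 0) = T.getD t 0 := by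
        rw [Std.HashMap.getD_insert, if_neg (by simpa using hp)]
      rw [hgd]
      simp [hp]

lemma pvFilter_single {L : List ((Int × Int × Int × Int) × Int)}
    {t : Int × Int × Int × Int} {v : Int}
    (hnd : (L.map Prod.fst).Nodup) (h : (t, v) ∈ L) :
    L.filter (fun p => p.1 == t) = [(t, v)] := by
  induction L with
  | nil => cases h
  | cons q L ih =>
    simp only [List.map_cons, List.nodup_cons, List.mem_map] at hnd
    rcases List.mem_cons.mp h with h | h
    · subst h
      have hnil : L.filter (fun p => p.1 == t) = [] :=
        List.filter_eq_nil_iff.mpr (fun p hp hb =>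
          hnd.1 ⟨p, hp, by simpa using hb⟩)
      simp [hnil]
    · have hq : ¬ (q.1 = t) := fun he => hnd.1 ⟨(t, v), h, by simp [he]⟩
      simp [hq, ih hnd.2 h]

lemma pvSum_filter_items (d : PySem.Dict (Int × Int × Int × Int) Int)
    (hnd : d.keys.Nodup) (t : Int × Int × Int × Int) :
    ((d.items.filter (fun p => p.1 == t)).map (·.2)).sum = d.getD t 0 := by
  cases hg : d.get? t with
  | none =>
    have ht : t ∉ d.keys := (PySem.Dict.get?_eq_none_iff_not_mem_keys d t).mp hg
    have hnil : d.items.filter (fun p => p.1 == t) = [] :=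
      List.filter_eq_nil_iff.mpr (fun p hp hb => by
        have : p.1 = t := by simpa using hb
        exact ht (this ▸ PySem.Dict.mem_keys_of_mem_items d hp))
    simp [hnil, PySem.Dict.getD_of_get?_eq_none d 0 hg]
  | some v =>
    have hm := PySem.Dict.mem_items_of_get?_eq_some d hg
    have hnd' : (d.items.map Prod.fst).Nodup := by
      simpa [PySem.Dict.keys] using hnd
    rw [pvFilter_single hnd' hm]
    simp [PySem.Dict.getD_of_get?_eq_some d 0 hg]

lemma pvS_nil (t : Int × Int × Int × Int) : pvS [] t = 0 := rfl

lemma pvS_cons (cm : PySem.Dict (Int × Int × Int × Int) Int)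
    (cms : List (PySem.Dict (Int × Int × Int × Int) Int)) (t : Int × Int × Int × Int) :
    pvS (cm :: cms) t = cm.getD t 0 + pvS cms t := by
  simp [pvS]

lemma pvIte_max (b v : Int) : (if v > b then v else b) = max b v := by omega

-- the merge loop's first component ignores the running max
lemma pvMergeFst (L : List ((Int × Int × Int × Int) × Int))
    (st : Std.HashMap (Int × Int × Int × Int) Int × Int) :
    (L.foldl pvMergeStep st).1
      = L.foldl (fun T p => T.insert p.1 (T.getD p.1 0 + p.2)) st.1 := by
  induction L generalizing st with
  | nil => rfl
  | cons p L ih =>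
    simp only [List.foldl_cons]
    show (L.foldl pvMergeStep
        (st.1.insert p.1 (st.1.getD p.1 0 + p.2),
          if st.1.getD p.1 0 + p.2 > st.2 then st.1.getD p.1 0 + p.2 else st.2)).1 = _
    rw [ih]

-- with distinct keys, the running max sees each key's final total once
lemma pvMergeSnd (L : List ((Int × Int × Int × Int) × Int))
    (st : Std.HashMap (Int × Int × Int × Int) Int × Int)
    (hnd : (L.map Prod.fst).Nodup) :
    (L.foldl pvMergeStep st).2
      = L.foldl (fun b p => max b (st.1.getD p.1 0 + p.2)) st.2 := by
  induction L generalizing st with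
  | nil => rfl
  | cons p L ih =>
    simp only [List.map_cons, List.nodup_cons, List.mem_map] at hnd
    simp only [List.foldl_cons]
    show (L.foldl pvMergeStep
        (st.1.insert p.1 (st.1.getD p.1 0 + p.2),
          if st.1.getD p.1 0 + p.2 > st.2 then st.1.getD p.1 0 + p.2 else st.2)).2 = _
    rw [ih _ hnd.2, pvIte_max]
    apply PySem.List.foldl_congr_mem
    intro b q hq
    show max b ((st.1.insert p.1 (st.1.getD p.1 0 + p.2)).getD q.1 0 + q.2) = _
    rw [Std.HashMap.getD_insert, if_neg (by simp; intro he; exact hnd.1 ⟨q, hq, he.symm⟩)]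

lemma pvFoldl_max_le_of {α : Type} (l : List α) (g : α → Int) :
    ∀ (b M : Int), b ≤ M → (∀ x ∈ l, g x ≤ M) →
      l.foldl (fun acc x => max acc (g x)) b ≤ M := by
  induction l with
  | nil => exact fun b M hb _ => hb
  | cons x l ih =>
    intro b M hb h
    simp only [List.foldl_cons]
    exact ih _ _ (max_le hb (h x List.mem_cons_self))
      (fun y hy => h y (List.mem_cons_of_mem _ hy))

lemma pvFoldl_max_proj_mem {α : Type} (l : List α) (g : α → Int) (i : Int) :
    l.foldl (fun b x => max b (g x)) i = i ∨
      ∃ x ∈ l, l.foldl (fun b x => max b (g x)) i = g x := by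
  induction l generalizing i with
  | nil => left; rfl
  | cons x l ih =>
    simp only [List.foldl_cons]
    rcases ih (max i (g x)) with h | ⟨y, hy, he⟩
    · rcases max_choice i (g x) with hm | hm
      · left; rw [h, hm]
      · right; exact ⟨x, List.mem_cons_self, h.trans hm⟩
    · right; exact ⟨y, List.mem_cons_of_mem _ hy, he⟩

-- one buyer's merge: totals gains the buyer's chain map, best stays the grid maximum
lemma pvBuyerStep (x : Int) (st : Std.HashMap (Int × Int × Int × Int) Int × Int)
    (S : (Int × Int × Int × Int) → Int)
    (hT : ∀ t, st.1.getD t 0 = S t)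
    (hB : st.2 = pvGrid.foldl (fun m t => max m (S t)) 0) :
    (∀ t, ((pvBuyerFirst x).items.foldl pvMergeStep st).1.getD t 0
        = S t + (pvCM x).getD t 0)
      ∧ ((pvBuyerFirst x).items.foldl pvMergeStep st).2
          = pvGrid.foldl (fun m t => max m (S t + (pvCM x).getD t 0)) 0 := by
  -- make the buyer's chain map opaque so no tactic tries to evaluate it
  have hinv := pvCM_inv x
  have hnn := pvCM_getD_nonneg x
  have hbe := pvBuyerFirst_eq x
  generalize hD : pvCM x = D at hinv hnn hbe ⊢
  rw [hbe]
  have hnd : (D.items.map Prod.fst).Nodup := by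
    simpa [PySem.Dict.keys] using hinv.1
  constructor
  · intro t
    rw [pvMergeFst, pvAccH_getD, hT, pvSum_filter_items _ hinv.1 t]
  · rw [pvMergeSnd _ _ hnd, hB]
    have hrw : D.items.foldl (fun b p => max b (st.1.getD p.1 0 + p.2))
          (pvGrid.foldl (fun m t => max m (S t)) 0)
        = D.items.foldl (fun b p => max b (S p.1 + D.getD p.1 0))
          (pvGrid.foldl (fun m t => max m (S t)) 0) := by
      apply PySem.List.foldl_congr_mem
      intro b p hp
      obtain ⟨k, v⟩ := p
      rw [hT, PySem.Dict.getD_of_mem_items _ hp hinv.1 0]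
    rw [hrw]
    set best := pvGrid.foldl (fun m t => max m (S t)) 0 with hbest
    have h0 : (0 : Int) ≤ best := (PySem.List.le_foldl_max_int pvGrid S 0).1
    have hSb : ∀ t ∈ pvGrid, S t ≤ best := (PySem.List.le_foldl_max_int pvGrid S 0).2
    have hle := PySem.List.le_foldl_max_int pvGrid (fun t => S t + D.getD t 0) 0
    apply le_antisymm
    · apply pvFoldl_max_le_of
      · apply pvFoldl_max_le_of
        · exact hle.1
        · intro t ht
          calc S t ≤ S t + D.getD t 0 := by have := hnn t; omega
            _ ≤ _ := hle.2 t ht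
      · intro p hp
        refine hle.2 p.1 (pvGood_mem_grid (hinv.2.1 p.1 ?_))
        exact PySem.Dict.mem_keys_of_mem_items _ hp
    · have hbb : best ≤ D.items.foldl (fun b p => max b (S p.1 + D.getD p.1 0)) best :=
        (PySem.List.le_foldl_max_int _ _ best).1
      rcases pvFoldl_max_proj_mem pvGrid (fun t => S t + D.getD t 0) 0 with h | ⟨t, htg, he⟩
      · rw [h]
        omega
      · rw [he]
        by_cases hc : ∃ v, (t, v) ∈ D.items
        · obtain ⟨v, hv⟩ := hc
          exact (PySem.List.le_foldl_max_int _ (fun p => S p.1 + D.getD p.1 0) best).2 (t, v) hv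
        · have hnm : D.get? t = none := by
            rw [PySem.Dict.get?_eq_none_iff_not_mem_keys]
            intro hmem
            obtain ⟨p, hp, hfst⟩ := List.mem_map.mp hmem
            exact hc ⟨p.2, by rwa [show ((t, p.2) : (Int × Int × Int × Int) × Int) = p from
              Prod.ext hfst.symm rfl]⟩
          have hz : D.getD t 0 = 0 := PySem.Dict.getD_of_get?_eq_none _ 0 hnm
          have hst : S t ≤ best := hSb t htg
          omega

-- the whole buyers loop, generalized over the starting state
lemma pvOuterFold (l : List Int) (st : Std.HashMap (Int × Int × Int × Int) Int × Int)
    (S : (Int × Int × Int × Int) → Int)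
    (hT : ∀ t, st.1.getD t 0 = S t)
    (hB : st.2 = pvGrid.foldl (fun m t => max m (S t)) 0) :
    (l.foldl (fun acc seed => (pvBuyerFirst seed).items.foldl pvMergeStep acc) st).2
      = pvGrid.foldl (fun m t => max m (S t + pvS (l.map pvCM) t)) 0 := by
  induction l generalizing st S with
  | nil =>
    rw [List.foldl_nil, hB]
    apply PySem.List.foldl_congr_mem
    intro m t _
    rw [List.map_nil, pvS_nil, add_zero]
  | cons x l ih =>
    rw [List.foldl_cons]
    obtain ⟨h1, h2⟩ := pvBuyerStep x st S hT hB
    refine (ih ((pvBuyerFirst x).items.foldl pvMergeStep st)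
      (fun t => S t + (pvCM x).getD t 0) h1 h2).trans ?_
    apply PySem.List.foldl_congr_mem
    intro m t _
    rw [List.map_cons, pvS_cons, add_assoc]

-- ===== VERDICT (by name: the statement is the Claim_ definition above) =====
theorem findMaxBananas_spec : Claim_equal_findMaxBananas := by
  intro buyers _
  unfold Spec_findMaxBananas
  rw [pvA_eq_grid, findMaxBananas_alt,
    pvOuterFold buyers (Std.HashMap.emptyWithCapacity, 0) (fun _ => 0)
      (fun t => Std.HashMap.getD_emptyWithCapacity)
      (by rcases pvFoldl_max_proj_mem pvGrid (fun _ => (0 : Int)) 0 with h | ⟨t, _, he⟩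
          · rw [h]
          · rw [he])]
  apply PySem.List.foldl_congr_mem
  intro m t _
  rw [zero_add]
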